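-- pv_equiv track=rewrite | github.com/ysmiraak/eti | src/util_io.py | vocab
-- ===== SOURCE A (Python) =====
-- from collections import Counter
--
-- def vocab(xs, specials= "\xa0\n ", min_freq= 2, top= 256):
--     """-> (list a) where
--
--     xs       : seq a
--     specials : seq a
--     min_freq : nat
--     top      : nat | None
--
--     returns the `top` most frequent items with `min_freq` in `xs`, and
--     ensures that the `specials` are included with the highest ranks.
--
--     """
--     freq = Counter(xs)
--     for x in specials: del freq[x]
--     freq = [(-n, x) for x, n in freq.items() if min_freq <= n]
--     freq.sort()
--     vocab = list(specials)
--     vocab.extend((x for _, x in freq))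
--     return vocab[:top] if top else vocab
-- ===== SOURCE B (Python) =====
-- def vocab(xs, specials= "\xa0\n ", min_freq= 2, top= 256):
--     sp = set(specials)
--     runs = []
--     prev = None
--     cnt = 0
--     for x in sorted(xs):
--         if x == prev:
--             cnt += 1
--         else:
--             if prev is not None:
--                 runs.append((prev, cnt))
--             prev, cnt = x, 1
--     if prev is not None:
--         runs.append((prev, cnt))
--     out = list(specials)
--     for x, n in sorted(runs, key=lambda p: -p[1]):
--         if min_freq <= n and x not in sp:
--             out.append(x)
--     return out[:top] if top else out
-- ===== Notes on version B (the rewrite author's own statement) =====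
-- stated objective: alternative
-- what changed: A builds a Counter hash map, deletes the specials from it and sorts (-count, item) tuples; B uses no dictionary at all: it sorts the items, run-length-encodes the sorted list into (item, count) runs (already ascending by item), then stable-sorts the runs by descending count, which reproduces A's (-count, item) order, filtering out low-frequency items and specials on output.
import Mathlib
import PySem

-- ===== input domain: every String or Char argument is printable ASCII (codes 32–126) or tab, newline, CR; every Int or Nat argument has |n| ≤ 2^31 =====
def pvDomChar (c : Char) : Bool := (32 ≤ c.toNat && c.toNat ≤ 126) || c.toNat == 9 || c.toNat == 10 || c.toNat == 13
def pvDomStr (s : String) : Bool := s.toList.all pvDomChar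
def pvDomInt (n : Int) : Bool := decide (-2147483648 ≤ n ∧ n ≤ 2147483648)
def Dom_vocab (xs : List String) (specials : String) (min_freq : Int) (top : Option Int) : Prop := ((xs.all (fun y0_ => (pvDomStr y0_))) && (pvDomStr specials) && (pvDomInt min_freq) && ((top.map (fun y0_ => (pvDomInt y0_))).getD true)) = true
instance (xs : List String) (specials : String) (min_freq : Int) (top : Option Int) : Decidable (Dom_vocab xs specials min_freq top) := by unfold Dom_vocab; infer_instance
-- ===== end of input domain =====

-- B replaces A's Counter-dictionary-plus-tuple-sort by a dictionary-free pipeline: sort the items,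
-- run-length-encode the sorted list into (item, count) runs, stable-sort the runs by descending
-- count, and filter on output (objective: alternative).

-- ===== PORT A =====
def vocab (xs : List String) (specials : String) (min_freq : Int) (top : Option Int) : List String :=
  let freq : PySem.Dict String Int := PySem.Dict.counter xs
  -- Counter.__delitem__ does not raise on a missing key, so the del loop is a plain erase
  let freq := specials.toList.foldl (fun d c => d.erase (String.singleton c)) freq
  let freqL := freq.items.filterMap (fun p => if min_freq ≤ p.2 then some (-p.2, p.1) else none)
  let freqS := PySem.List.sorted2 freqL (fun q => q.1) (fun q => q.2) false
  let v := specials.toList.map (fun c => String.singleton c) ++ freqS.map (fun q => q.2)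
  match top with
  | none => v
  | some t => if t = 0 then v else PySem.List.slice v none (some t)

-- ===== PORT B =====
-- the body of Source B's first loop: extend the current run or flush it and start a new one
def rleStep (s : List (String × Int) × Option String × Int) (x : String) :
    List (String × Int) × Option String × Int :=
  if some x = s.2.1 then (s.1, s.2.1, s.2.2 + 1)
  else ((match s.2.1 with | none => s.1 | some p => s.1 ++ [(p, s.2.2)]), some x, 1)

-- Source B's trailing 'if prev is not None: runs.append((prev, cnt))'
def rleFlush (s : List (String × Int) × Option String × Int) : List (String × Int) :=
  match s.2.1 with | none => s.1 | some p => s.1 ++ [(p, s.2.2)]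

def vocab_alt (xs : List String) (specials : String) (min_freq : Int) (top : Option Int) : List String :=
  let sp : PySem.Set String := PySem.Set.ofList (specials.toList.map (fun c => String.singleton c))
  let runs := rleFlush ((PySem.List.sorted xs (fun x => x) false).foldl rleStep ([], none, 0))
  let out := (PySem.List.sorted runs (fun p => -p.2) false).foldl
      (fun acc p => if min_freq ≤ p.2 ∧ sp.contains p.1 = false then acc ++ [p.1] else acc)
      (specials.toList.map (fun c => String.singleton c))
  match top with
  | none => out
  | some t => if t = 0 then out else PySem.List.slice out none (some t)

-- ===== PRECONDITION & SPEC =====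
def Spec_vocab (xs : List String) (specials : String) (min_freq : Int) (top : Option Int) (out : List String) : Prop := out = vocab_alt xs specials min_freq top
instance (xs : List String) (specials : String) (min_freq : Int) (top : Option Int) (out : List String) : Decidable (Spec_vocab xs specials min_freq top out) := by unfold Spec_vocab; infer_instance

-- ===== CLAIM (what is proved, stated in full; the proofs are below) =====
def Claim_equal_vocab : Prop := ∀ (xs : List String) (specials : String) (min_freq : Int) (top : Option Int), Dom_vocab xs specials min_freq top → Spec_vocab xs specials min_freq top (vocab xs specials min_freq top)

-- ===== LEMMAS AND PROOFS =====

theorem filterMap_guard {α β : Type} (l : List α) (c : α → Prop) [DecidablePred c] (f : α → β) :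
    l.filterMap (fun p => if c p then some (f p) else none) = (l.filter (fun p => decide (c p))).map f := by
  induction l with
  | nil => rfl
  | cons p l ih => by_cases h : c p <;> simp [h, ih]

theorem sorted2_eq_sorted_lex {α κ₁ κ₂ : Type} [LinearOrder κ₁] [LinearOrder κ₂]
    (xs : List α) (k1 : α → κ₁) (k2 : α → κ₂) :
    PySem.List.sorted2 xs k1 k2 false = PySem.List.sorted xs (fun a => toLex (k1 a, k2 a)) false := by
  show xs.foldl (fun acc x => PySem.List.insertBy _ x acc) [] = xs.foldl (fun acc x => PySem.List.insertBy _ x acc) []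
  congr 1
  funext acc x
  congr 1
  funext a b
  simp only [Prod.Lex.toLex_lt_toLex]
  rcases lt_trichotomy (k1 a) (k1 b) with h | h | h
  · simp [h, not_lt_of_gt h]
  · simp [h]
  · have h1 : ¬ k1 a < k1 b := not_lt_of_gt h
    have h2 : k1 a ≠ k1 b := h.ne'
    simp [h1, h, h2]

theorem erase_foldl_items {κ ν β : Type} [BEq κ] [LawfulBEq κ] (cs : List β) (f : β → κ)
    (d : PySem.Dict κ ν) :
    (cs.foldl (fun d c => d.erase (f c)) d).items
      = d.items.filter (fun p => decide (p.1 ∉ cs.map f)) := by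
  induction cs generalizing d with
  | nil => simp
  | cons c cs ih =>
    rw [List.foldl_cons, ih]
    simp only [PySem.Dict.erase, List.filter_filter, List.map_cons]
    apply List.filter_congr
    intro p _
    simp only [List.mem_cons, Bool.and_comm]
    by_cases h1 : p.1 = f c <;> simp [h1]

theorem ofList_sublist {α : Type} [BEq α] [LawfulBEq α] (l : List α) : (PySem.Set.ofList l).Sublist l := by
  induction l with
  | nil => simp [PySem.Set.ofList_nil]
  | cons x t ih =>
    rw [PySem.Set.ofList_cons, PySem.Set.discard]
    exact List.Sublist.cons₂ x (List.filter_sublist.trans ih)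

theorem pairwise_lt_of_le_nodup {α κ : Type} [LinearOrder κ] (key : α → κ)
    (hinj : Function.Injective key) {l : List α}
    (h1 : l.Pairwise (fun a b => key a ≤ key b)) (h2 : l.Nodup) :
    l.Pairwise (fun a b => key a < key b) :=
  (h1.and h2).imp (fun h => lt_of_le_of_ne h.1 (fun he => h.2 (hinj he)))

theorem insertBy_congr {α : Type} (c₁ c₂ : α → α → Bool) (x : α) (ys : List α)
    (h : ∀ y ∈ ys, c₁ x y = c₂ x y) :
    PySem.List.insertBy c₁ x ys = PySem.List.insertBy c₂ x ys := by
  induction ys with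
  | nil => rfl
  | cons y ys ih =>
    simp only [PySem.List.insertBy]
    rw [h y (by simp), ih (fun z hz => h z (by simp [hz]))]

theorem stable_sorted_eq_lex {α κ₁ κ₂ : Type} [LinearOrder κ₁] [LinearOrder κ₂]
    (l : List α) (k : α → κ₁) (K : α → κ₂) (hl : l.Pairwise (fun a b => K a < K b)) :
    PySem.List.sorted l k false = PySem.List.sorted l (fun a => toLex (k a, K a)) false := by
  rw [PySem.List.sorted_eq_foldl_insertBy, PySem.List.sorted_eq_foldl_insertBy]
  suffices h : ∀ (l : List α) (acc : List α), l.Pairwise (fun a b => K a < K b) →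
      (∀ x ∈ l, ∀ y ∈ acc, K y < K x) →
      l.foldl (fun acc x => PySem.List.insertBy (fun a b => decide (k a < k b)) x acc) acc
        = l.foldl (fun acc x => PySem.List.insertBy
            (fun a b => decide (toLex (k a, K a) < toLex (k b, K b))) x acc) acc by
    exact h l [] hl (by simp)
  intro l
  induction l with
  | nil => intro acc _ _; rfl
  | cons x t ih =>
    intro acc hp hacc
    have hins : PySem.List.insertBy (fun a b => decide (k a < k b)) x acc
        = PySem.List.insertBy (fun a b => decide (toLex (k a, K a) < toLex (k b, K b))) x acc := by
      apply insertBy_congr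
      intro y hy
      have hKy : K y < K x := hacc x (by simp) y hy
      simp only [Prod.Lex.toLex_lt_toLex, decide_eq_decide]
      constructor
      · intro hk; exact Or.inl hk
      · rintro (hk | ⟨_, hK⟩)
        · exact hk
        · exact absurd hK (not_lt_of_gt hKy)
    rw [List.foldl_cons, List.foldl_cons, hins]
    apply ih _ hp.tail
    intro x' hx' y hy
    rcases (PySem.List.mem_insertBy _ _ _ _).1 hy with rfl | hy'
    · exact (List.pairwise_cons.1 hp).1 x' hx'
    · exact hacc x' (by simp [hx']) y hy'

theorem rle_run (l : List String) (done : List (String × Int)) (p : String) (c : Int)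
    (hord : l.Pairwise (· ≤ ·)) (hp : ∀ x ∈ l, p ≤ x) :
    rleFlush (l.foldl rleStep (done, some p, c))
      = done ++ (p, c + (l.count p : Int))
          :: ((PySem.Set.ofList l).filter (fun k => !(k == p))).map (fun k => (k, (l.count k : Int))) := by
  induction l generalizing done p c with
  | nil => simp [rleFlush, PySem.Set.ofList_nil]
  | cons x t ih =>
    rw [List.foldl_cons]
    by_cases hx : x = p
    · subst hx
      have hstep : rleStep (done, some x, c) x = (done, some x, c + 1) := by
        simp [rleStep]
      rw [hstep, ih done x (c + 1) hord.tail (fun y hy => (List.pairwise_cons.1 hord).1 y hy),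
          PySem.Set.ofList_cons, List.count_cons_self]
      have h1 : c + 1 + ((t.count x : Nat) : Int) = c + ((t.count x + 1 : Nat) : Int) := by
        push_cast; ring
      have h2 : List.filter (fun k => !(k == x)) (x :: PySem.Set.discard (PySem.Set.ofList t) x)
          = List.filter (fun k => !(k == x)) (PySem.Set.ofList t) := by
        rw [List.filter_cons_of_neg (by simp), PySem.Set.discard, List.filter_filter]
        apply List.filter_congr; intro k _; simp
      rw [h2, h1]
      congr 1
      congr 1
      apply List.map_congr_left
      intro k hk
      have hkx : k ≠ x := by simpa using (List.of_mem_filter hk)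
      simp [Ne.symm hkx]
    · have hstep : rleStep (done, some p, c) x = (done ++ [(p, c)], some x, 1) := by
        simp only [rleStep]
        rw [if_neg (by simpa using fun h : x = p => hx h)]
      have hpx : p < x := lt_of_le_of_ne (hp x (by simp)) (fun h => hx h.symm)
      have hpt : ∀ y ∈ t, p < y := fun y hy =>
        lt_of_lt_of_le hpx ((List.pairwise_cons.1 hord).1 y hy)
      have hcp : (x :: t).count p = 0 := by
        rw [List.count_eq_zero]
        intro hmem
        rcases List.mem_cons.1 hmem with h | h
        · exact hx h.symm
        · exact absurd rfl (ne_of_gt (hpt p h))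
      have hfilt : ((PySem.Set.discard (PySem.Set.ofList t) x).filter fun k => !(k == p))
          = (PySem.Set.ofList t).filter fun k => !(k == x) := by
        rw [PySem.Set.discard, List.filter_filter]
        apply List.filter_congr
        intro k hk
        have hkp : k ≠ p := ne_of_gt (hpt k ((PySem.Set.mem_ofList t k).1 hk))
        simp [hkp, Bool.and_comm]
      rw [hstep, ih (done ++ [(p, c)]) x 1 hord.tail (fun y hy => (List.pairwise_cons.1 hord).1 y hy),
          List.append_assoc, hcp]
      simp only [Nat.cast_zero, add_zero, List.singleton_append]
      congr 1
      congr 1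
      rw [PySem.Set.ofList_cons, List.filter_cons_of_pos (by simp [hx]), List.map_cons, hfilt]
      congr 1
      · simp only [Prod.mk.injEq, true_and]
        rw [List.count_cons_self]
        push_cast; ring
      · apply List.map_congr_left
        intro k hk
        have hkx : k ≠ x := by simpa using (List.of_mem_filter hk)
        simp [Ne.symm hkx]

theorem rle_eq (l : List String) (hord : l.Pairwise (· ≤ ·)) :
    rleFlush (l.foldl rleStep ([], none, 0))
      = (PySem.Set.ofList l).map (fun k => (k, (l.count k : Int))) := by
  cases l with
  | nil => rfl
  | cons x t =>
    rw [List.foldl_cons]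
    have hstep : rleStep (([] : List (String × Int)), none, (0 : Int)) x = ([], some x, 1) := by
      simp [rleStep]
    rw [hstep, rle_run t [] x 1 hord.tail (fun y hy => (List.pairwise_cons.1 hord).1 y hy)]
    rw [PySem.Set.ofList_cons, List.map_cons, List.nil_append]
    congr 1
    · simp only [Prod.mk.injEq, true_and]
      simp
      ring
    · rw [PySem.Set.discard]
      have : ((PySem.Set.ofList t).filter fun k => !(k == x)).map (fun k => (k, ((x :: t).count k : Int)))
          = ((PySem.Set.ofList t).filter fun k => !(k == x)).map (fun k => (k, (t.count k : Int))) := by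
        apply List.map_congr_left
        intro k hk
        have hkx : k ≠ x := by simpa using (List.of_mem_filter hk)
        simp [Ne.symm hkx]
      rw [this]

theorem core (xs : List String) (cs : List Char) (mf : Int) :
    (PySem.List.sorted2
        (((cs.foldl (fun d c => d.erase (String.singleton c)) (PySem.Dict.counter xs)).items).filterMap
          (fun p => if mf ≤ p.2 then some (-p.2, p.1) else none))
        (fun q => q.1) (fun q => q.2) false).map (fun q => q.2)
    = ((PySem.List.sorted (rleFlush ((PySem.List.sorted xs (fun x => x) false).foldl rleStep ([], none, 0)))
          (fun p => -p.2) false).filter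
        (fun p => decide (mf ≤ p.2 ∧ (PySem.Set.ofList (cs.map (fun c => String.singleton c))).contains p.1 = false))).map
        (fun p => p.1) := by
  -- ===== A side: the pair list M is a map over the kept keys =====
  rw [erase_foldl_items, PySem.Dict.items_counter, List.filter_map, filterMap_guard, List.filter_map,
      List.filter_filter, List.map_map, sorted2_eq_sorted_lex]
  simp only [Function.comp_def]
  -- ===== B side: runs, then the stable sort as a lex sort =====
  have hordSL : (PySem.List.sorted xs (fun x => x) false).Pairwise (· ≤ ·) :=
    PySem.List.sorted_pairwise xs (fun x => x)
  rw [rle_eq _ hordSL]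
  have hcnt : (fun k => (k, ((PySem.List.sorted xs (fun x => x) false).count k : Int)))
      = fun k => (k, (xs.count k : Int)) := by
    funext k
    rw [(PySem.List.sorted_perm xs (fun x => x) false).count_eq k]
  rw [hcnt]
  have hD : PySem.Set.ofList (PySem.List.sorted xs (fun x => x) false)
      = PySem.List.sorted (PySem.Set.ofList xs) (fun k => k) false := by
    symm
    apply PySem.List.sorted_eq_of_perm_of_pairwise_lt
    · exact (List.perm_ext_iff_of_nodup (PySem.Set.nodup_ofList _) (PySem.Set.nodup_ofList _)).2
        (fun a => by
          rw [PySem.Set.mem_ofList, PySem.Set.mem_ofList, PySem.List.mem_sorted])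
    · exact pairwise_lt_of_le_nodup (fun k => k) (fun _ _ h => h)
        ((List.Pairwise.sublist (ofList_sublist _) hordSL))
        (PySem.Set.nodup_ofList _)
  rw [hD]
  have hDlt : (PySem.List.sorted (PySem.Set.ofList xs) (fun k => k) false).Pairwise (· < ·) :=
    PySem.List.sorted_ofList_pairwise_lt xs
  have hDnodup : (PySem.List.sorted (PySem.Set.ofList xs) (fun k => k) false).Nodup := hDlt.nodup
  have hrunsfst : ((PySem.List.sorted (PySem.Set.ofList xs) (fun k => k) false).map
      (fun k => (k, (xs.count k : Int)))).Pairwise (fun a b => a.1 < b.1) := by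
    rw [List.pairwise_map]
    exact hDlt
  rw [stable_sorted_eq_lex ((PySem.List.sorted (PySem.Set.ofList xs) (fun k => k) false).map (fun k => (k, (xs.count k : Int)))) (fun p => -p.2) (fun p => p.1) hrunsfst]
  -- name the pieces
  set D : List String := PySem.List.sorted (PySem.Set.ofList xs) (fun k => k) false with hDdef
  set g : String → String × Int := fun k => (k, (xs.count k : Int)) with hg
  set pred : String × Int → Bool := fun p =>
    decide (mf ≤ p.2 ∧ (PySem.Set.ofList (cs.map (fun c => String.singleton c))).contains p.1 = false) with hpred
  set S : List (String × Int) := PySem.List.sorted (D.map g) (fun a => toLex (-a.2, a.1)) false with hSdef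
  have hSperm : S.Perm (D.map g) := by rw [hSdef]; exact PySem.List.sorted_perm _ _ _
  have hDperm : D.Perm (PySem.Set.ofList xs) := by rw [hDdef]; exact PySem.List.sorted_perm _ _ _
  have hrnodup : (D.map g).Nodup := hDnodup.map (fun a b h => congrArg Prod.fst h)
  have hfnodup : (S.filter pred).Nodup := (hSperm.symm.nodup hrnodup).sublist List.filter_sublist
  have hkept : (D.map g).filter pred = (D.filter (fun k => pred (g k))).map g := by
    rw [List.filter_map]; rfl
  have hfcond : D.filter (fun k => pred (g k))
      = D.filter (fun a => decide (mf ≤ (xs.count a : Int)) && decide (a ∉ cs.map String.singleton)) := by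
    apply List.filter_congr
    intro k _
    rw [hpred, hg]
    by_cases h1 : mf ≤ (xs.count k : Int) <;>
      by_cases h2 : k ∈ cs.map String.singleton <;>
        simp [h1, h2, PySem.Set.mem_ofList]
  have hperm : ((S.filter pred).map (fun p => ((-p.2 : Int), p.1))).Perm
      (((PySem.Set.ofList xs).filter
          (fun a => decide (mf ≤ (xs.count a : Int)) && decide (a ∉ cs.map String.singleton))).map
        (fun x => ((-(xs.count x : Int) : Int), x))) := by
    have p1 : (S.filter pred).Perm ((D.map g).filter pred) := hSperm.filter pred
    have p2 := (hDperm.filter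
      (fun a => decide (mf ≤ (xs.count a : Int)) && decide (a ∉ cs.map String.singleton))).map
      (fun x => ((-(xs.count x : Int) : Int), x))
    refine ((p1.map _).trans ?_).trans p2
    rw [hkept, hfcond, List.map_map]
    exact List.Perm.refl _
  have hlt : ((S.filter pred).map (fun p => ((-p.2 : Int), p.1))).Pairwise
      (fun a b => toLex (a.1, a.2) < toLex (b.1, b.2)) := by
    apply pairwise_lt_of_le_nodup (fun q : Int × String => toLex (q.1, q.2))
      (fun a b h => by
        have h2 := toLex.injective h
        cases a; cases b; simpa using h2)
    · rw [List.pairwise_map]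
      have hSle : S.Pairwise (fun a b => toLex ((-a.2 : Int), a.1) ≤ toLex ((-b.2 : Int), b.1)) := by
        rw [hSdef]
        exact PySem.List.sorted_pairwise (D.map g) (fun a => toLex (-a.2, a.1))
      exact hSle.sublist List.filter_sublist
    · exact hfnodup.map (fun a b h => by
        cases a; cases b
        simpa [Prod.ext_iff, neg_inj, and_comm] using h)
  have hsorted_eq : PySem.List.sorted
      (((PySem.Set.ofList xs).filter
          (fun a => decide (mf ≤ (xs.count a : Int)) && decide (a ∉ cs.map String.singleton))).map
        (fun x => ((-(xs.count x : Int) : Int), x)))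
      (fun a => toLex (a.1, a.2)) false
      = (S.filter pred).map (fun p => ((-p.2 : Int), p.1)) :=
    PySem.List.sorted_eq_of_perm_of_pairwise_lt _ _ _ hperm hlt
  rw [hsorted_eq, List.map_map]
  rfl

-- ===== VERDICT (by name: the statement is the Claim_ definition above) =====
theorem vocab_spec : Claim_equal_vocab := by
  intro xs specials min_freq top _
  simp only [Spec_vocab, vocab, vocab_alt]
  rw [PySem.List.foldl_append_ite
    (p := fun p : String × Int => min_freq ≤ p.2 ∧ (PySem.Set.ofList (specials.toList.map (fun c => String.singleton c))).contains p.1 = false)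
    (f := fun p : String × Int => p.1)]
  rw [core xs specials.toList min_freq]
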